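-- pv_equiv track=rewrite | github.com/hgchoi1116/notes | Python/Week9 List/Choi_hw8.py | num_xy
-- ===== SOURCE A (Python) =====
-- def num_xy(user_change):
--     x=0
--     y=0
--     for element in user_change:
--         for i in range(len((element))):
--             if element[i]=="X":
--                 x+=1
--             else:
--                 y+=1
--     return x,y
-- ===== SOURCE B (Python) =====
-- def num_xy(user_change):
--     # Build a frequency table of every character first, then read the answer
--     # off the table: x is the histogram entry for "X", y is everything else.
--     freq = {}
--     for element in user_change:
--         for ch in element:
--             freq[ch] = freq.get(ch, 0) + 1
--     x = freq.get("X", 0)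
--     y = sum(freq.values()) - x
--     return x, y
-- ===== Notes on version B (the rewrite author's own statement) =====
-- stated objective: alternative
-- what changed: B builds a character-frequency dictionary over all strings and derives the answer from the table (x = histogram['X'], y = sum of all histogram values minus x), instead of A's nested index loop that branches on each character and bumps one of two counters.
import Mathlib
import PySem

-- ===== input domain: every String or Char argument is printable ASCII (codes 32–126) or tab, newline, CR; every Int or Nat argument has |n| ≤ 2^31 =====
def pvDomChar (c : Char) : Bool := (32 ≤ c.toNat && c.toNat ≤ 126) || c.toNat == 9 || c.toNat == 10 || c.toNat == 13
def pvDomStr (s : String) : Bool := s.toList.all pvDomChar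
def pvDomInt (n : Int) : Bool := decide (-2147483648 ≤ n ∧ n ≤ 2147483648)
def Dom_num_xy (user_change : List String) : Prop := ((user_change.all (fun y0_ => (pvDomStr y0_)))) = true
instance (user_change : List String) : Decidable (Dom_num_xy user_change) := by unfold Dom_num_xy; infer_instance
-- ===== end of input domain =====

-- B builds a character-frequency dictionary over all strings and reads the answer off the
-- table (x = histogram['X'], y = total of histogram values minus x) instead of A's nested
-- index loop branching per character (objective: alternative).

-- ===== PORT A =====
def num_xy (user_change : List String) : Int × Int :=
  user_change.foldl
    (fun (xy : Int × Int) element =>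
      (PySem.List.pyRange 0 (PySem.Str.len element) 1).foldl
        (fun (xy : Int × Int) i =>
          if PySem.List.pyGetD element.toList i ' ' == 'X' then (xy.1 + 1, xy.2)
          else (xy.1, xy.2 + 1))
        xy)
    (0, 0)

-- ===== PORT B =====
def num_xy_alt (user_change : List String) : Int × Int :=
  let freq : PySem.Dict Char Int :=
    user_change.foldl
      (fun d element =>
        element.toList.foldl (fun d ch => d.insert ch (d.getD ch 0 + 1)) d)
      PySem.Dict.empty
  let x : Int := freq.getD 'X' 0
  let y : Int := freq.values.sum - x
  (x, y)

-- ===== PRECONDITION & SPEC =====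
def Spec_num_xy (user_change : List String) (out : Int × Int) : Prop := out = num_xy_alt user_change
instance (user_change : List String) (out : Int × Int) : Decidable (Spec_num_xy user_change out) := by unfold Spec_num_xy; infer_instance

-- ===== CLAIM (what is proved, stated in full; the proofs are below) =====
def Claim_equal_num_xy : Prop := ∀ (user_change : List String), Dom_num_xy user_change → Spec_num_xy user_change (num_xy user_change)

-- ===== LEMMAS AND PROOFS =====

-- A's inner character loop computes (x + count 'X', y + (len - count 'X'))
theorem inner_fold (l : List Char) (xy : Int × Int) :
    l.foldl (fun (xy : Int × Int) c =>
        if c == 'X' then (xy.1 + 1, xy.2) else (xy.1, xy.2 + 1)) xy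
      = (xy.1 + l.count 'X', xy.2 + ((l.length : Int) - l.count 'X')) := by
  induction l generalizing xy with
  | nil => simp
  | cons h t ih =>
    by_cases hc : h = 'X'
    · simp only [List.foldl_cons, hc, beq_self_eq_true, if_true, ih, List.count_cons,
        List.length_cons, Prod.mk.injEq]
      constructor <;> (push_cast; ring)
    · have hbe : (h == 'X') = false := beq_eq_false_iff_ne.mpr hc
      simp only [List.foldl_cons, hbe, Bool.false_eq_true, if_false, ih, List.count_cons,
        List.length_cons, Prod.mk.injEq]
      have hle : t.count 'X' ≤ t.length := List.count_le_length
      constructor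
      · simp
      · simp; omega

-- A equals (count of 'X', rest) over the concatenation of all the strings' characters
theorem num_xy_eq (uc : List String) :
    num_xy uc = ((((uc.flatMap String.toList).count 'X' : Int)),
                 (((uc.flatMap String.toList).length : Int)
                   - ((uc.flatMap String.toList).count 'X' : Int))) := by
  unfold num_xy
  have key : ∀ (l : List String) (xy : Int × Int),
      l.foldl
        (fun (xy : Int × Int) element =>
          (PySem.List.pyRange 0 (PySem.Str.len element) 1).foldl
            (fun (xy : Int × Int) i =>
              if PySem.List.pyGetD element.toList i ' ' == 'X' then (xy.1 + 1, xy.2)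
              else (xy.1, xy.2 + 1)) xy) xy
        = (xy.1 + ((l.flatMap String.toList).count 'X' : Int),
           xy.2 + (((l.flatMap String.toList).length : Int)
                    - ((l.flatMap String.toList).count 'X' : Int))) := by
    intro l
    induction l with
    | nil => intro xy; simp
    | cons s t ih =>
      intro xy
      rw [List.foldl_cons]
      have hs := PySem.List.foldl_pyRange_zero_pyGetD s.toList ' '
        (fun (xy : Int × Int) c => if c == 'X' then (xy.1 + 1, xy.2) else (xy.1, xy.2 + 1)) xy
      have hlen : PySem.Str.len s = PySem.List.len s.toList := by simp [PySem.Str.len_eq]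
      rw [hlen, hs, inner_fold, ih]
      simp only [List.flatMap_cons, List.count_append, List.length_append, Prod.mk.injEq]
      constructor <;> (push_cast; ring)
  rw [key]
  simp

-- B's nested dictionary loop is the counter of the concatenated character list
theorem freq_eq_counter (uc : List String) :
    uc.foldl
        (fun d element =>
          element.toList.foldl
            (fun (d : PySem.Dict Char Int) ch => d.insert ch (d.getD ch 0 + 1)) d)
        PySem.Dict.empty
      = PySem.Dict.counter (uc.flatMap String.toList) := by
  rw [← PySem.Dict.foldl_insert_getD_add_one_eq_counter]
  have : ∀ (l : List String) (d : PySem.Dict Char Int),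
      l.foldl
          (fun d element =>
            element.toList.foldl (fun d ch => d.insert ch (d.getD ch 0 + 1)) d) d
        = (l.flatMap String.toList).foldl (fun d ch => d.insert ch (d.getD ch 0 + 1)) d := by
    intro l
    induction l with
    | nil => intro d; simp
    | cons s t ih => intro d; simp [List.foldl_append, ih]
  exact this uc PySem.Dict.empty

-- the counter's values sum to the length of the counted list
theorem counter_values_sum (cs : List Char) :
    (PySem.Dict.counter cs).values.sum = (cs.length : Int) := by
  have hv : (PySem.Dict.counter cs).values
      = (PySem.Set.ofList cs).map (fun k => (cs.count k : Int)) := by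
    have := PySem.Dict.items_counter (xs := cs)
    simp only [PySem.Dict.values, this, List.map_map]
    rfl
  rw [hv]
  have hperm : (PySem.Set.ofList cs).Perm cs.dedup := by
    rw [List.perm_ext_iff_of_nodup (PySem.Set.nodup_ofList cs) cs.nodup_dedup]
    intro a
    rw [PySem.Set.mem_ofList, List.mem_dedup]
  calc ((PySem.Set.ofList cs).map (fun k => (cs.count k : Int))).sum
      = (cs.dedup.map (fun k => (cs.count k : Int))).sum :=
        (hperm.map (fun k => (cs.count k : Int))).sum_eq
    _ = ((cs.dedup.map (fun k => cs.count k)).map (fun n : Nat => (n : Int))).sum := by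
        simp [List.map_map]; rfl
    _ = (cs.length : Int) := by
        rw [← Nat.cast_list_sum, List.sum_map_count_dedup_eq_length]

-- ===== VERDICT (by name: the statement is the Claim_ definition above) =====
theorem num_xy_spec : Claim_equal_num_xy := by
  intro uc _
  show num_xy uc = num_xy_alt uc
  rw [num_xy_eq]
  unfold num_xy_alt
  rw [freq_eq_counter]
  simp only [PySem.Dict.getD_counter, counter_values_sum]
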